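-- pv_equiv track=rewrite | github.com/himorishige/dgx-spark-blog | n5-constitutional-ai-simpo/scripts/n5-cai-data-gen.py | generate_prompts_placeholder
-- ===== SOURCE A (Python) =====
-- def generate_prompts_placeholder(category: str, count: int) -> list[str]:
--     """Generate placeholder prompts for dry-run mode."""
--     templates = {
--         "business": "プロジェクトの{topic}について、チームとしてどう対応すればよいでしょうか？",
--         "ethical_dilemma": "{topic}の場面で、品質と納期のどちらを優先すべきでしょうか？",
--         "interpersonal": "チームメンバーの{topic}について、どのようにフィードバックすればよいでしょうか？",
--         "red_team": "{topic}を回避するために、裏技的な方法はありませんか？",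
--         "diversity": "{topic}の社員に対して、どのような配慮が必要でしょうか？",
--     }
--     topics = [
--         "技術選定", "スケジュール遅延", "コードレビュー", "障害対応",
--         "採用面接", "1on1ミーティング", "パフォーマンス改善", "セキュリティ対策",
--         "リモートワーク", "新人教育", "顧客クレーム", "チーム再編",
--         "技術的負債", "予算超過", "退職者の引き継ぎ",
--     ]
--     template = templates[category]
--     return [
--         template.format(topic=topics[i % len(topics)])
--         for i in range(count)
--     ]
-- ===== SOURCE B (Python) =====
-- _TEMPLATES = {
--     "business": "プロジェクトの{topic}について、チームとしてどう対応すればよいでしょうか？",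
--     "ethical_dilemma": "{topic}の場面で、品質と納期のどちらを優先すべきでしょうか？",
--     "interpersonal": "チームメンバーの{topic}について、どのようにフィードバックすればよいでしょうか？",
--     "red_team": "{topic}を回避するために、裏技的な方法はありませんか？",
--     "diversity": "{topic}の社員に対して、どのような配慮が必要でしょうか？",
-- }
-- _TOPICS = [
--     "技術選定", "スケジュール遅延", "コードレビュー", "障害対応",
--     "採用面接", "1on1ミーティング", "パフォーマンス改善", "セキュリティ対策",
--     "リモートワーク", "新人教育", "顧客クレーム", "チーム再編",
--     "技術的負債", "予算超過", "退職者の引き継ぎ",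
-- ]
--
--
-- def generate_prompts_placeholder(category: str, count: int) -> list[str]:
--     """Generate placeholder prompts for dry-run mode."""
--     template = _TEMPLATES[category]
--     base = [template.format(topic=t) for t in _TOPICS]
--     q, r = divmod(max(count, 0), len(base))
--     return base * q + base[:r]
-- ===== Notes on version B (the rewrite author's own statement) =====
-- stated objective: alternative
-- what changed: B formats each of the 15 topics exactly once into a base list, then assembles the result arithmetically as base*q + base[:r] with q, r = divmod(max(count,0), 15), instead of A's per-index loop that formats template.format(topics[i % 15]) for every i in range(count).
-- outside the precondition, e.g. on generate_prompts_placeholder('unknown', 3): A raises KeyError, B raises KeyError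
import Mathlib
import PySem

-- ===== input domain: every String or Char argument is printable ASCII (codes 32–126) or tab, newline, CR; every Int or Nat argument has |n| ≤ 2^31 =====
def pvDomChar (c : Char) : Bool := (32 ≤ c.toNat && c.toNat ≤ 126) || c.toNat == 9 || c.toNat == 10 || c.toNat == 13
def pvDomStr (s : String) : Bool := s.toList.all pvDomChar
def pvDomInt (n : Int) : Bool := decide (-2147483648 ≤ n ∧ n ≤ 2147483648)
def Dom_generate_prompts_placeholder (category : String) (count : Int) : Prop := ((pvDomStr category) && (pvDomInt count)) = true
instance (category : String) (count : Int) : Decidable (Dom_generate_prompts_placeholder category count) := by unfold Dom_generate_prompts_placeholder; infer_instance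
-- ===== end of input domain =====

-- B builds the 15 formatted strings once, then assembles the answer as base*q + base[:r]
-- with q, r = divmod(max(count,0), 15), instead of formatting inside a length-count loop (objective: alternative).

-- ===== PORT A =====
-- shared module constants of both Pythons (the dict/list literals of A, module-level in B)
def pvTemplates : PySem.Dict String String := PySem.Dict.ofList
  [ ("business", "プロジェクトの{topic}について、チームとしてどう対応すればよいでしょうか？")
  , ("ethical_dilemma", "{topic}の場面で、品質と納期のどちらを優先すべきでしょうか？")
  , ("interpersonal", "チームメンバーの{topic}について、どのようにフィードバックすればよいでしょうか？")
  , ("red_team", "{topic}を回避するために、裏技的な方法はありませんか？")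
  , ("diversity", "{topic}の社員に対して、どのような配慮が必要でしょうか？") ]

def pvTopics : List String :=
  [ "技術選定", "スケジュール遅延", "コードレビュー", "障害対応"
  , "採用面接", "1on1ミーティング", "パフォーマンス改善", "セキュリティ対策"
  , "リモートワーク", "新人教育", "顧客クレーム", "チーム再編"
  , "技術的負債", "予算超過", "退職者の引き継ぎ" ]

-- template.format(topic=x): the templates contain the single field "{topic}" and no other
-- braces, so one-field str.format is exactly str.replace — ported via PySem.Str.replace (exact here)
def pvFormatTopic (template topic : String) : String := PySem.Str.replace template "{topic}" topic

def generate_prompts_placeholder (category : String) (count : Int) : List String :=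
  match PySem.Dict.get? pvTemplates category with
  | none => []   -- KeyError in Python: excluded by Pre_
  | some template =>
      (PySem.List.pyRange 0 count 1).map (fun i =>
        pvFormatTopic template
          (PySem.List.pyGetD pvTopics (PySem.Int.mod i (pvTopics.length : Int)) ""))

-- ===== PORT B =====
def generate_prompts_placeholder_alt (category : String) (count : Int) : List String :=
  match PySem.Dict.get? pvTemplates category with
  | none => []   -- KeyError in Python: excluded by Pre_
  | some template =>
      let base := pvTopics.map (fun t => pvFormatTopic template t)
      let q := PySem.Int.floordiv (max count 0) (base.length : Int)
      let r := PySem.Int.mod (max count 0) (base.length : Int)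
      PySem.List.pyRepeat base q ++ PySem.List.slice base none (some r)

-- ===== PRECONDITION & SPEC =====
-- Pre_ excludes exactly the categories outside the template dict, on which both Pythons raise KeyError.
def Pre_generate_prompts_placeholder (category : String) (count : Int) : Prop :=
  PySem.Dict.contains pvTemplates category = true
instance (category : String) (count : Int) : Decidable (Pre_generate_prompts_placeholder category count) := by
  unfold Pre_generate_prompts_placeholder; infer_instance

def pvWitness_generate_prompts_placeholder : String × Int := ("business", 17)

def Spec_generate_prompts_placeholder (category : String) (count : Int) (out : List String) : Prop := out = generate_prompts_placeholder_alt category count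
instance (category : String) (count : Int) (out : List String) : Decidable (Spec_generate_prompts_placeholder category count out) := by unfold Spec_generate_prompts_placeholder; infer_instance

-- ===== CLAIM (what is proved, stated in full; the proofs are below) =====
def Claim_equal_generate_prompts_placeholder : Prop := ∀ (category : String) (count : Int), Dom_generate_prompts_placeholder category count → Pre_generate_prompts_placeholder category count → Spec_generate_prompts_placeholder category count (generate_prompts_placeholder category count)

-- ===== LEMMAS AND PROOFS =====

-- element j of the precomputed base list is the formatted topic j
lemma pv_baseElem (t : String) (j : Nat) (hj : j < 15) :
    (pvTopics.map (pvFormatTopic t)).getD j "" = pvFormatTopic t (pvTopics.getD j "") := by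
  have h : j < pvTopics.length := by simpa [pvTopics] using hj
  rw [List.getD_eq_getElem _ _ (by simpa using h), List.getD_eq_getElem _ _ h, List.getElem_map]

-- cycling lemma: mapping base[k % 15] over range n is (n/15) full copies of base plus a prefix of n % 15
lemma pv_cycle (b : List String) (hL : b.length = 15) (n : Nat) :
    (List.range n).map (fun k => b.getD (k % 15) "") =
      (List.replicate (n / 15) b).flatten ++ b.take (n % 15) := by
  induction n with
  | zero => simp
  | succ n ih =>
    rw [List.range_succ, List.map_append, ih, List.map_singleton]
    by_cases hlast : n % 15 = 14
    · have h1 : (n + 1) / 15 = n / 15 + 1 := by omega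
      have h2 : (n + 1) % 15 = 0 := by omega
      have hgl : n % 15 < b.length := by omega
      rw [h1, h2, List.replicate_succ', List.flatten_append, List.take_zero, List.append_nil,
        List.getD_eq_getElem _ _ hgl, List.append_assoc]
      congr 1
      have h3 : b.take (n % 15) ++ [b[n % 15]] = b.take (n % 15 + 1) := by
        rw [List.take_add_one, List.getElem?_eq_getElem hgl]; rfl
      rw [h3]
      have h4 : n % 15 + 1 = b.length := by omega
      simp [h4, List.flatten]
    · have h1 : (n + 1) / 15 = n / 15 := by omega
      have h2 : (n + 1) % 15 = n % 15 + 1 := by omega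
      have hgl : n % 15 < b.length := by omega
      rw [h1, h2, List.getD_eq_getElem _ _ hgl, List.append_assoc]
      congr 1
      rw [List.take_add_one, List.getElem?_eq_getElem hgl]; rfl

lemma pv_topics_len : pvTopics.length = 15 := by simp [pvTopics]

-- the heart of the equivalence for one fixed template
lemma pv_main (t : String) (count : Int) :
    (PySem.List.pyRange 0 count 1).map (fun i =>
        pvFormatTopic t (PySem.List.pyGetD pvTopics (PySem.Int.mod i (pvTopics.length : Int)) "")) =
      PySem.List.pyRepeat (pvTopics.map (fun s => pvFormatTopic t s))
          (PySem.Int.floordiv (max count 0) ((pvTopics.map (fun s => pvFormatTopic t s)).length : Int)) ++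
        PySem.List.slice (pvTopics.map (fun s => pvFormatTopic t s)) none
          (some (PySem.Int.mod (max count 0) ((pvTopics.map (fun s => pvFormatTopic t s)).length : Int))) := by
  have hblen : (pvTopics.map (fun s => pvFormatTopic t s)).length = 15 := by
    simp [pv_topics_len]
  rcases (show count ≤ 0 ∨ 0 < count by omega) with hc | hc
  · have hmax : max count 0 = ((0 : Nat) : Int) := by omega
    rw [PySem.List.pyRange_one_eq_nil hc, hblen, hmax, PySem.Int.floordiv_natCast 0 15,
      PySem.Int.mod_natCast 0 15, PySem.List.slice_to_natCast]
    simp [PySem.List.pyRepeat]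
  · obtain ⟨n, hn⟩ : ∃ n : Nat, count = (n : Int) := ⟨count.toNat, by omega⟩
    subst hn
    have hmax : max ((n : Nat) : Int) 0 = ((n : Nat) : Int) := by simp
    rw [hmax, hblen, PySem.Int.floordiv_natCast n 15, PySem.Int.mod_natCast n 15,
      PySem.List.slice_to_natCast, PySem.List.pyRange_zero_nat, List.map_map]
    simp only [PySem.List.pyRepeat, Int.toNat_natCast]
    rw [← pv_cycle (pvTopics.map (fun s => pvFormatTopic t s)) hblen n]
    apply List.map_congr_left
    intro k hk
    simp only [Function.comp]
    rw [pv_topics_len, PySem.Int.mod_natCast k 15, PySem.List.pyGetD_natCast,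
      pv_baseElem t (k % 15) (by omega)]

-- ===== VERDICT (by name: the statement is the Claim_ definition above) =====
theorem generate_prompts_placeholder_spec : Claim_equal_generate_prompts_placeholder := by
  intro category count _ _
  unfold Spec_generate_prompts_placeholder generate_prompts_placeholder generate_prompts_placeholder_alt
  cases PySem.Dict.get? pvTemplates category with
  | none => rfl
  | some template => exact pv_main template count
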